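-- pv_equiv track=rewrite | github.com/hnpl/project-euler | 8th_100/problem712.py | prime_factor_count
-- ===== SOURCE A (Python) =====
-- def prime_factor_count(n, prime):
--     p = prime
--     count = []
--     count.append(n)
--     while p <= n:
--         count.append(n // p)
--         p *= prime
--     for i in range(len(count)-1):
--         # currently, count[i] counts the number of numbers in the range [1..N] that is divisible by p**i, p**(i+1), p**(i+2), etc.
--         # however, we want the number of numbers divisible up to p**i (i.e., not divisible by p**(i+1))
--         # we can calculate this by simply subtracting the number of numbers divisible by p**i, p**(i+1), p**(i+2), etc. by the number of number divisible by p**(i+1), p**(i+2), etc.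
--         count[i] = count[i] - count[i+1]
--     return count
-- ===== SOURCE B (Python) =====
-- def prime_factor_count(n, prime):
--     if n < prime:
--         return [n]
--     m = n // prime
--     return [n - m] + prime_factor_count(m, prime)
-- ===== Notes on version B (the rewrite author's own statement) =====
-- stated objective: simpler
-- what changed: B is a direct recursion on the repeated quotient: if n < prime return [n], else emit n - n//prime and recurse on n//prime; it has no power accumulator p, no stored quotient list and no second in-place difference pass, using the identity n//prime^(i+1) = (n//prime)//prime^i.
-- outside the precondition, e.g. on prime_factor_count(10, -2): A returns [15, -7, 4, -2], B returns [15, -5]; on prime_factor_count(0, -1): A returns [0, 0], B does not finish within the time limit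
import Mathlib
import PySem

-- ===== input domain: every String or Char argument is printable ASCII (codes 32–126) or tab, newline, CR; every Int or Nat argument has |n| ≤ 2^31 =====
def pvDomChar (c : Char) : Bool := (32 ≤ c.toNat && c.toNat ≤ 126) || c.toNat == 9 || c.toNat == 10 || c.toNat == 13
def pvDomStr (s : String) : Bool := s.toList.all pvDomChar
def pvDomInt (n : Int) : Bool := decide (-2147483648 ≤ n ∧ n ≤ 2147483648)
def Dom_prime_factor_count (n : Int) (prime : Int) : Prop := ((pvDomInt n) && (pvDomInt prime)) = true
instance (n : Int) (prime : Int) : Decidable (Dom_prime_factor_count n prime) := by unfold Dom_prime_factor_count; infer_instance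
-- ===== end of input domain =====

-- B replaces A's power iteration plus in-place difference pass by a direct recursion on the
-- repeated quotient n // prime (objective: simpler); return values proved identical on Pre_.

-- ===== PORT A =====
-- A's while loop appending n // p, p *= prime (fuel only makes the recursion total;
-- 100 steps cover every terminating run inside Dom ∧ Pre_).
def pvBuildA (n prime p : Int) (fuel : Nat) : List Int :=
  match fuel with
  | 0 => []
  | fuel + 1 =>
    if p ≤ n then PySem.Int.floordiv n p :: pvBuildA n prime (p * prime) fuel
    else []

-- A's second pass: for i in range(len(count)-1): count[i] = count[i] - count[i+1]
def pvDiffA : List Int → List Int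
  | a :: b :: rest => (a - b) :: pvDiffA (b :: rest)
  | l => l

def prime_factor_count (n : Int) (prime : Int) : List Int :=
  pvDiffA (n :: pvBuildA n prime prime 100)

-- ===== PORT B =====
-- B's recursion: if n < prime return [n], else m = n // prime and [n - m] + f(m)
-- (fuel only makes the recursion total; 100 steps cover every run inside Dom ∧ Pre_).
def pvRecB (prime n : Int) (fuel : Nat) : List Int :=
  match fuel with
  | 0 => [n]
  | fuel + 1 =>
    if n < prime then [n]
    else
      let m := PySem.Int.floordiv n prime
      (n - m) :: pvRecB prime m fuel

def prime_factor_count_alt (n : Int) (prime : Int) : List Int :=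
  pvRecB prime n 100

-- ===== PRECONDITION & SPEC =====
-- Pre_ admits prime ≥ 2 (the natural domain of a prime base) together with the trivial
-- region n < prime; it excludes prime ≤ 1 with n ≥ prime, where A raises
-- ZeroDivisionError (prime = 0), loops forever (prime = 1, and prime = -1 for n ≥ 1),
-- or — for negative prime — returns alternating-sign quotient lists that are an accident
-- of the sign pattern of the powers, which B's repeated-division recursion does not mimic.
def Pre_prime_factor_count (n : Int) (prime : Int) : Prop :=
  2 ≤ prime ∨ n < prime
instance (n : Int) (prime : Int) : Decidable (Pre_prime_factor_count n prime) := by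
  unfold Pre_prime_factor_count; infer_instance

def pvWitness_prime_factor_count : Int × Int := (10, 2)

def Spec_prime_factor_count (n : Int) (prime : Int) (out : List Int) : Prop :=
  out = prime_factor_count_alt n prime
instance (n : Int) (prime : Int) (out : List Int) : Decidable (Spec_prime_factor_count n prime out) := by
  unfold Spec_prime_factor_count; infer_instance

-- ===== CLAIM (what is proved, stated in full; the proofs are below) =====
def Claim_equal_prime_factor_count : Prop := ∀ (n : Int) (prime : Int), Dom_prime_factor_count n prime → Pre_prime_factor_count n prime → Spec_prime_factor_count n prime (prime_factor_count n prime)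

-- ===== LEMMAS AND PROOFS =====
-- When the loop guard fails at once, A's while loop appends nothing, for any fuel.
theorem pvBuildA_nil (n prime p : Int) (h : ¬ p ≤ n) :
    ∀ fuel, pvBuildA n prime p fuel = [] := by
  intro fuel; cases fuel <;> simp [pvBuildA, h]

-- When n < prime, B's recursion returns [n] at once, for any fuel.
theorem pvRecB_base (prime n : Int) (h : n < prime) :
    ∀ fuel, pvRecB prime n fuel = [n] := by
  intro fuel; cases fuel <;> simp [pvRecB, h]

-- Shifting one factor of prime out of A's power accumulator divides n once.
theorem pvBuildA_shift (n prime : Int) (hp : 2 ≤ prime) :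
    ∀ (fuel : Nat) (p : Int), 0 < p →
      pvBuildA n prime (p * prime) fuel = pvBuildA (PySem.Int.floordiv n prime) prime p fuel := by
  intro fuel
  induction fuel with
  | zero => intro p _; rfl
  | succ fuel ih =>
    intro p hpos
    have hprime : (0 : Int) < prime := by omega
    have hcond : p * prime ≤ n ↔ p ≤ PySem.Int.floordiv n prime := by
      rw [PySem.Int.le_floordiv_iff_mul_le hprime]
    have hdiv : PySem.Int.floordiv n (p * prime)
        = PySem.Int.floordiv (PySem.Int.floordiv n prime) p := by
      rw [PySem.Int.floordiv_eq_ediv_of_pos (by positivity),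
          PySem.Int.floordiv_eq_ediv_of_pos hprime,
          PySem.Int.floordiv_eq_ediv_of_pos hpos]
      rw [mul_comm p prime]
      exact (Int.ediv_ediv_of_nonneg (by omega)).symm
    by_cases h : p * prime ≤ n
    · simp only [pvBuildA, if_pos h, if_pos (hcond.mp h), hdiv]
      have := ih (p * prime) (by positivity)
      rw [mul_assoc] at this ⊢
      rw [this]
    · simp only [pvBuildA, if_neg h, if_neg (fun hc => h (hcond.mpr hc))]

-- A's stored-then-differenced list equals B's recursion, for every fuel.
theorem pvDiffA_eq_pvRecB (prime : Int) (hp : 2 ≤ prime) :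
    ∀ (fuel : Nat) (n : Int),
      pvDiffA (n :: pvBuildA n prime prime fuel) = pvRecB prime n fuel := by
  intro fuel
  induction fuel with
  | zero => intro n; rfl
  | succ fuel ih =>
    intro n
    by_cases h : prime ≤ n
    · have hshift := pvBuildA_shift n prime hp fuel prime (by omega)
      simp only [pvBuildA, if_pos h, pvRecB, if_neg (by omega : ¬ n < prime)]
      rw [hshift]
      simp only [pvDiffA]
      exact congrArg _ (ih _)
    · rw [pvBuildA_nil n prime prime h (fuel + 1), pvRecB_base prime n (by omega) (fuel + 1)]
      rfl

-- ===== VERDICT (by name: the statement is the Claim_ definition above) =====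
theorem prime_factor_count_spec : Claim_equal_prime_factor_count := by
  intro n prime _ hpre
  unfold Spec_prime_factor_count prime_factor_count prime_factor_count_alt
  rcases hpre with hp | hlt
  · exact pvDiffA_eq_pvRecB prime hp 100 n
  · rw [pvBuildA_nil n prime prime (by omega) 100, pvRecB_base prime n hlt 100]
    rfl
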